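-- pv_equiv track=rewrite | github.com/KasraF/LEAP-Artifact | test/rtv/conditionals/if.py | try_if
-- ===== SOURCE A (Python) =====
-- def try_if(l):
-- 	ret = 0
-- 	for x in l:
-- 		if x == 1:
-- 			ret += 2
-- 		elif x == 0:
-- 			ret += 4
-- 		else:
-- 			ret -= 2
-- 	return ret
-- ===== SOURCE B (Python) =====
-- def try_if(l):
--     ones = l.count(1)
--     zeros = l.count(0)
--     return 2 * ones + 4 * zeros - 2 * (len(l) - ones - zeros)
-- ===== Notes on version B (the rewrite author's own statement) =====
-- stated objective: simpler
-- what changed: Replaces the per-element if/elif/else accumulation with two count() passes and a closed-form arithmetic expression over ones, zeros and len(l).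
import Mathlib
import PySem

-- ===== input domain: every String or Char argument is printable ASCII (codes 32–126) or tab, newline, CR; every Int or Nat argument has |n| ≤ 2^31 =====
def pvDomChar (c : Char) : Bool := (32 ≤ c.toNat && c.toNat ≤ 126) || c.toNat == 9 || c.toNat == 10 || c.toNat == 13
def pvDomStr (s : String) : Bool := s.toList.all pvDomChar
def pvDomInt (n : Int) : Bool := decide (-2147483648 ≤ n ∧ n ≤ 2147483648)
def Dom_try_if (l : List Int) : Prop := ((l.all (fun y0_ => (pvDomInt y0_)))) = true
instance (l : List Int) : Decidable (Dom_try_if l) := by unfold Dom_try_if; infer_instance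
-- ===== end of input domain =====

-- B replaces the per-element if/elif/else accumulation with two count() passes and a closed-form expression (objective: simpler).

-- ===== PORT A =====
def try_if (l : List Int) : Int :=
  l.foldl (fun ret x => if x == 1 then ret + 2 else if x == 0 then ret + 4 else ret - 2) 0

-- ===== PORT B =====
def try_if_alt (l : List Int) : Int :=
  let ones : Int := PySem.List.count l 1
  let zeros : Int := PySem.List.count l 0
  2 * ones + 4 * zeros - 2 * ((l.length : Int) - ones - zeros)

-- ===== PRECONDITION & SPEC =====
def Spec_try_if (l : List Int) (out : Int) : Prop := out = try_if_alt l
instance (l : List Int) (out : Int) : Decidable (Spec_try_if l out) := by unfold Spec_try_if; infer_instance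

-- ===== CLAIM (what is proved, stated in full; the proofs are below) =====
def Claim_equal_try_if : Prop := ∀ (l : List Int), Dom_try_if l → Spec_try_if l (try_if l)

-- ===== LEMMAS AND PROOFS =====

-- ===== VERDICT (by name: the statement is the Claim_ definition above) =====
theorem try_if_gen (l : List Int) (a : Int) :
    l.foldl (fun ret x => if x == 1 then ret + 2 else if x == 0 then ret + 4 else ret - 2) a
      = a + try_if_alt l := by
  induction l generalizing a with
  | nil => simp [try_if_alt, PySem.List.count]
  | cons x xs ih =>
      simp only [List.foldl_cons, ih]
      simp only [try_if_alt, PySem.List.count, List.count_cons, List.length_cons]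
      by_cases h1 : x = 1
      · simp [h1]; ring
      · by_cases h0 : x = 0
        · simp [h0]; ring
        · simp [h1, h0, beq_iff_eq]; ring

theorem try_if_spec : Claim_equal_try_if := by
  intro l _
  unfold Spec_try_if try_if
  rw [try_if_gen]
  ring
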